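-- pv_equiv track=rewrite | github.com/massooti/flask | src/controllers/GradeController.py | calRank2
-- ===== SOURCE A (Python) =====
-- from collections import defaultdict
--
-- def calRank2(scoresList):
--
--     sortedList = sorted(scoresList, reverse=True)
--     # sortedRank = [sortedList.index(x, 1) for x in sortedList]
--     # rankBasesd = list(map(xPlus, sortedIndex))
--     scores = []
--     globalRanks = []
--     counter = 1
--     dicts = defaultdict(list)
--     for score in sortedList:
--         if len(scores) == 0:
--             scores.append(score)
--             globalRanks.append(counter)
--         elif score == scores[0]:
--             scores.append(score)
--             globalRanks.append(globalRanks[-1])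
--         elif score != scores[0]:
--             scores.clear()
--             scores.append(score)
--             globalRanks.append(counter)
--
--         dicts[score] .append(counter)
--         counter += 1
--
-- # TODO: should improve
--     fetchedRank = []
--     meta = []
--     for score in scoresList:
--         if score in dicts:
--             fetchedRank.append(dicts[score][0])
--             meta.append(
--                 {"score": score, "rank": dicts[score][0]})
--
--     return fetchedRank
-- ===== SOURCE B (Python) =====
-- def calRank2(scoresList):
--     return [1 + sum(1 for s in scoresList if s > score) for score in scoresList]
-- ===== Notes on version B (the rewrite author's own statement) =====
-- stated objective: simpler
-- what changed: Replaced the sort + position-dict bookkeeping (and dead scores/globalRanks/meta lists) with a one-line comprehension: each score's competition rank is 1 plus the number of strictly greater scores.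
import Mathlib
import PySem

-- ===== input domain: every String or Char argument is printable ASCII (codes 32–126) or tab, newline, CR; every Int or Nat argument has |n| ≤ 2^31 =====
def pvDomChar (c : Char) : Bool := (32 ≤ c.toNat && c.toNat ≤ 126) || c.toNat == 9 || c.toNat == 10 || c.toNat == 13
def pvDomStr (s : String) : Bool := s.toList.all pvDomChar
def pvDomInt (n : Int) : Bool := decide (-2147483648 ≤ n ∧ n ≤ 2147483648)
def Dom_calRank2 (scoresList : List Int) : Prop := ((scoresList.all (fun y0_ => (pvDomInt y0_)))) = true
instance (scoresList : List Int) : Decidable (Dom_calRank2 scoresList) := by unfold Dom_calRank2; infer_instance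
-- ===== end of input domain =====

-- B replaces A's sort + position-dict bookkeeping (with its dead scores/globalRanks/meta lists)
-- by a direct comprehension: rank = 1 + number of strictly greater scores (objective: simpler).

-- ===== PORT A =====
-- The loop over sortedList: state (scores, globalRanks, counter, dicts).
-- scores[0] / globalRanks[-1] are read only when the lists are nonempty (the branch guards
-- guarantee it), so pyGetD's default value is unreachable there.
def calRank2_loopA : List Int → List Int → List Int → Int → PySem.Dict Int (List Int) →
    List Int × List Int × Int × PySem.Dict Int (List Int)
  | [], scores, globalRanks, counter, dicts => (scores, globalRanks, counter, dicts)
  | score :: rest, scores, globalRanks, counter, dicts =>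
    let (scores, globalRanks) :=
      if scores.length = 0 then
        (scores ++ [score], globalRanks ++ [counter])
      else if score = PySem.List.pyGetD scores 0 0 then
        (scores ++ [score], globalRanks ++ [PySem.List.pyGetD globalRanks (-1) 0])
      else  -- score != scores[0]
        ([] ++ [score], globalRanks ++ [counter])
    -- dicts[score].append(counter)  (defaultdict(list))
    let dicts := dicts.modify score [] (· ++ [counter])
    calRank2_loopA rest scores globalRanks (counter + 1) dicts

def calRank2 (scoresList : List Int) : List Int :=
  let sortedList := PySem.List.sorted scoresList (fun x => x) true
  let st := calRank2_loopA sortedList [] [] 1 PySem.Dict.empty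
  let dicts := st.2.2.2
  -- second loop; meta is a dead local (never returned) and is not ported
  let fetchedRank := scoresList.foldl
    (fun acc score =>
      if dicts.contains score then
        acc ++ [PySem.List.pyGetD (dicts.getD score []) 0 0]
      else acc) []
  fetchedRank

-- ===== PORT B =====
def calRank2_alt (scoresList : List Int) : List Int :=
  scoresList.map (fun score => 1 + (scoresList.countP (fun s => decide (score < s)) : Int))

-- ===== PRECONDITION & SPEC =====
def Spec_calRank2 (scoresList : List Int) (out : List Int) : Prop := out = calRank2_alt scoresList
instance (scoresList : List Int) (out : List Int) : Decidable (Spec_calRank2 scoresList out) := by unfold Spec_calRank2; infer_instance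

-- ===== CLAIM (what is proved, stated in full; the proofs are below) =====
def Claim_equal_calRank2 : Prop := ∀ (scoresList : List Int), Dom_calRank2 scoresList → Spec_calRank2 scoresList (calRank2 scoresList)

-- ===== LEMMAS AND PROOFS =====

-- 1-based positions of x in l, counting from c
def calRank2_allPos (c : Int) : List Int → Int → List Int
  | [], _ => []
  | a :: t, x => (if a = x then [c] else []) ++ calRank2_allPos (c + 1) t x

theorem calRank2_loopA_getD (l : List Int) (x : Int) :
    ∀ (scores globalRanks : List Int) (c : Int) (d : PySem.Dict Int (List Int)),
      (calRank2_loopA l scores globalRanks c d).2.2.2.getD x []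
        = d.getD x [] ++ calRank2_allPos c l x := by
  induction l with
  | nil => intro _ _ _ _; simp [calRank2_loopA, calRank2_allPos]
  | cons a t ih =>
    intro scores globalRanks c d
    simp only [calRank2_loopA, calRank2_allPos]
    rw [ih]
    rw [PySem.Dict.getD_modify]
    by_cases h : x = a
    · subst h; simp
    · simp [h, Ne.symm h]

theorem calRank2_loopA_contains (l : List Int) (x : Int) :
    ∀ (scores globalRanks : List Int) (c : Int) (d : PySem.Dict Int (List Int)),
      (calRank2_loopA l scores globalRanks c d).2.2.2.contains x
        = (d.contains x || decide (x ∈ l)) := by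
  induction l with
  | nil => intro _ _ _ _; simp [calRank2_loopA]
  | cons a t ih =>
    intro scores globalRanks c d
    simp only [calRank2_loopA]
    rw [ih, PySem.Dict.contains_modify]
    by_cases h : x = a
    · subst h; simp
    · have hb : (x == a) = false := beq_eq_false_iff_ne.mpr h
      simp [hb, h]

-- on a descending list, the first position of a member x is c + (#elements > x)
theorem calRank2_allPos_head (l : List Int) (x : Int)
    (hs : l.Pairwise (fun a b => b ≤ a)) (hx : x ∈ l) :
    ∀ c : Int, (calRank2_allPos c l x).head? =
      some (c + (l.countP (fun s => decide (x < s)) : Int)) := by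
  induction l with
  | nil => cases hx
  | cons a t ih =>
    intro c
    rcases List.pairwise_cons.mp hs with ⟨ha, ht⟩
    by_cases h : a = x
    · subst h
      have hz : t.countP (fun s => decide (a < s)) = 0 := by
        apply List.countP_eq_zero.mpr
        intro s hs'
        simp only [decide_eq_true_eq]
        exact not_lt.mpr (ha s hs')
      simp [calRank2_allPos, hz]
    · have hxt : x ∈ t := by
        rcases List.mem_cons.mp hx with h' | h'
        · exact absurd h'.symm h
        · exact h'
      have hlt : x < a := lt_of_le_of_ne (ha x hxt) (fun hh => h hh.symm)
      have := ih ht hxt (c + 1)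
      simp only [calRank2_allPos, h, if_false, List.nil_append]
      rw [this]
      have : (a :: t).countP (fun s => decide (x < s))
          = t.countP (fun s => decide (x < s)) + 1 := by
        simp [hlt]
      rw [this]
      congr 1
      push_cast
      ring

theorem calRank2_rank_eq (scoresList : List Int) (x : Int) (hx : x ∈ scoresList) :
    PySem.List.pyGetD
      (((calRank2_loopA (PySem.List.sorted scoresList (fun x => x) true) [] [] 1
          PySem.Dict.empty).2.2.2).getD x []) 0 0
      = 1 + (scoresList.countP (fun s => decide (x < s)) : Int) := by
  set sl := PySem.List.sorted scoresList (fun x => x) true with hsl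
  have hmem : x ∈ sl := (PySem.List.mem_sorted scoresList (fun x => x) true x).mpr hx
  have hpair : sl.Pairwise (fun a b => b ≤ a) :=
    PySem.List.sorted_pairwise_rev scoresList (fun x => x)
  have hd := calRank2_loopA_getD sl x [] [] 1 PySem.Dict.empty
  rw [hd, PySem.Dict.getD_empty, List.nil_append]
  have hhead := calRank2_allPos_head sl x hpair hmem 1
  have hcnt : sl.countP (fun s => decide (x < s))
      = scoresList.countP (fun s => decide (x < s)) :=
    (PySem.List.sorted_perm scoresList (fun x => x) true).countP_eq _
  rcases hh : calRank2_allPos 1 sl x with _ | ⟨r, rs⟩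
  · rw [hh] at hhead; simp at hhead
  · rw [hh] at hhead
    simp only [List.head?_cons, Option.some.injEq] at hhead
    simp [PySem.List.pyGetD, PySem.List.pyGet?, PySem.List.pyIdx?, hhead, hcnt]

-- ===== VERDICT (by name: the statement is the Claim_ definition above) =====
theorem calRank2_spec : Claim_equal_calRank2 := by
  intro scoresList _
  unfold Spec_calRank2 calRank2 calRank2_alt
  simp only []
  rw [PySem.List.foldl_append_if]
  rw [List.nil_append]
  have hfilter : scoresList.filter
      (fun score => ((calRank2_loopA (PySem.List.sorted scoresList (fun x => x) true) [] [] 1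
        PySem.Dict.empty).2.2.2).contains score) = scoresList := by
    apply List.filter_eq_self.mpr
    intro a ha
    rw [calRank2_loopA_contains]
    simp [PySem.List.mem_sorted, ha]
  rw [hfilter]
  apply List.map_congr_left
  intro a ha
  exact calRank2_rank_eq scoresList a ha
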